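-- pv_equiv track=rewrite | github.com/slavanr45/MyGit | Contests/Codeforces 2023/Feb_contest/E.py | convert
-- ===== SOURCE A (Python) =====
-- def convert(s: str) -> str:
--     result, prev = '', ''
--     for i in range(len(s)):
--         if s[i] != prev:
--             result += s[i]
--             prev = s[i]
--         elif s[i] == prev and result[-1] != '+':
--             result += '+'
--     return result
-- ===== SOURCE B (Python) =====
-- def convert(s: str) -> str:
--     # Two-phase: split s into maximal runs, then render each run.
--     # A run of length 1 renders as its char; a longer run as char + '+',
--     # except a run of '+' which renders as a single '+' (the marker is '+').
--     runs = []
--     for c in s: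
--         if runs and runs[-1][0] == c:
--             runs[-1][1] += 1
--         else:
--             runs.append([c, 1])
--     return ''.join(c if n == 1 or c == '+' else c + '+' for c, n in runs)
-- ===== Notes on version B (the rewrite author's own statement) =====
-- stated objective: alternative
-- what changed: B first run-length-encodes the string into maximal (char, count) runs and then renders each run independently, instead of A's single-pass state machine tracking prev and inspecting result[-1].
import Mathlib
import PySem

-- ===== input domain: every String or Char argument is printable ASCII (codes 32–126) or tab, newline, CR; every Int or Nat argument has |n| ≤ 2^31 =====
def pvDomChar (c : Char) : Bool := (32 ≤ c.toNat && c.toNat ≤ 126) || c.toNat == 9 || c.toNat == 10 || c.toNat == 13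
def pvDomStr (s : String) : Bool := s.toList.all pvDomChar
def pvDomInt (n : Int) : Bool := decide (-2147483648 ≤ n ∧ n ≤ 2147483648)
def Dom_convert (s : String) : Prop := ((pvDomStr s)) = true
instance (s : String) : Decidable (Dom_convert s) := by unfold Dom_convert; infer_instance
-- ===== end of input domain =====

-- B replaces A's single-pass prev/result[-1] state machine by run-length encoding followed by per-run rendering (alternative decomposition, same cost).

-- ===== PORT A =====
-- state = (result as List Char, prev as Option Char: none = Python's initial '')
def stepA (st : List Char × Option Char) (c : Char) : List Char × Option Char :=
  if some c ≠ st.2 then (st.1 ++ [c], some c)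
  else if some c = st.2 ∧ PySem.List.pyGet? st.1 (-1) ≠ some '+' then (st.1 ++ ['+'], st.2)
  else st

def convert (s : String) : String :=
  String.mk (s.toList.foldl stepA ([], none)).1

-- ===== PORT B =====
def stepB (runs : List (Char × Int)) (c : Char) : List (Char × Int) :=
  match runs.getLast? with
  | some (c0, n) => if c0 = c then runs.dropLast ++ [(c0, n + 1)] else runs ++ [(c, 1)]
  | none => [(c, 1)]

def rend (p : Char × Int) : List Char :=
  if p.2 = 1 ∨ p.1 = '+' then [p.1] else [p.1, '+']

def convert_alt (s : String) : String :=
  String.mk (((s.toList.foldl stepB []).map rend).flatten)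

-- ===== PRECONDITION & SPEC =====
def Spec_convert (s : String) (out : String) : Prop := out = convert_alt s
instance (s : String) (out : String) : Decidable (Spec_convert s out) := by unfold Spec_convert; infer_instance

-- ===== CLAIM (what is proved, stated in full; the proofs are below) =====
def Claim_equal_convert : Prop := ∀ (s : String), Dom_convert s → Spec_convert s (convert s)

-- ===== LEMMAS AND PROOFS =====

lemma loop_eq : ∀ (l : List Char) (runs : List (Char × Int)),
    (∀ p ∈ runs, 1 ≤ p.2) →
    l.foldl stepA ((runs.map rend).flatten, (runs.getLast?).map Prod.fst)
      = (((l.foldl stepB runs).map rend).flatten, ((l.foldl stepB runs).getLast?).map Prod.fst) := by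
  intro l
  induction l with
  | nil => intro runs _; simp
  | cons c l ih =>
    intro runs hinv
    rcases List.eq_nil_or_concat runs with rfl | ⟨front, ⟨c0, n⟩, rfl⟩
    · -- empty state: A appends c, B starts the run (c, 1)
      have h := ih [(c, 1)] (by simp)
      simpa [stepA, stepB, rend] using h
    · simp only [List.concat_eq_append] at hinv ⊢
      have hn : (1 : Int) ≤ n := hinv (c0, n) (by simp)
      simp only [List.foldl_cons, List.getLast?_concat, Option.map_some, List.map_append,
        List.flatten_append, List.map_cons, List.map_nil, List.flatten_cons, List.flatten_nil,
        List.append_nil]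
      by_cases hc : c0 = c
      · subst hc
        have hB : stepB (front ++ [(c0, n)]) c0 = front ++ [(c0, n + 1)] := by
          simp [stepB]
        have hinv' : ∀ p ∈ front ++ [(c0, n + 1)], (1 : Int) ≤ p.2 := by
          intro p hp
          rcases List.mem_append.1 hp with h | h
          · exact hinv p (List.mem_append.2 (Or.inl h))
          · simp at h; subst h; omega
        have h := ih (front ++ [(c0, n + 1)]) hinv'
        simp only [List.getLast?_concat, Option.map_some, List.map_append, List.flatten_append,
          List.map_cons, List.map_nil, List.flatten_cons, List.flatten_nil, List.append_nil] at h
        by_cases hp : c0 = '+'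
        · -- repeated '+': A skips, B bumps the count; both renderings stay ['+']
          have hr : rend (c0, n) = ['+'] := by simp [rend, hp]
          have hr' : rend (c0, n + 1) = ['+'] := by simp [rend, hp]
          have hA : stepA ((front.map rend).flatten ++ ['+'], some c0)  c0
              = ((front.map rend).flatten ++ ['+'], some c0) := by
            simp [stepA, PySem.List.pyGet?_neg_one_append_singleton, hp]
          rw [hr'] at h
          rw [hr, hB, hA]
          exact h
        · by_cases h1 : n = 1
          · -- second char of a run: A appends '+', B's render grows to [c0, '+']
            subst h1
            have hr : rend (c0, 1) = [c0] := by simp [rend]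
            have hr' : rend (c0, (1 : Int) + 1) = [c0, '+'] := by norm_num [rend, hp]
            have hA : stepA ((front.map rend).flatten ++ [c0], some c0) c0
                = ((front.map rend).flatten ++ [c0] ++ ['+'], some c0) := by
              simp [stepA, PySem.List.pyGet?_neg_one_append_singleton, hp]
            rw [hr'] at h
            rw [hr, hB, hA]
            simpa using h
          · -- later char of a run: A's result already ends in '+', B's render is unchanged
            have hr : rend (c0, n) = [c0, '+'] := by simp [rend, hp, h1]
            have hr' : rend (c0, n + 1) = [c0, '+'] := by
              simp [rend, hp, show n + 1 ≠ 1 by omega]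
            have hlast : PySem.List.pyGet? ((front.map rend).flatten ++ [c0, '+']) (-1)
                = some '+' := by
              rw [show (front.map rend).flatten ++ [c0, '+']
                  = ((front.map rend).flatten ++ [c0]) ++ ['+'] by simp]
              exact PySem.List.pyGet?_neg_one_append_singleton _ _
            have hA : stepA ((front.map rend).flatten ++ [c0, '+'], some c0) c0
                = ((front.map rend).flatten ++ [c0, '+'], some c0) := by
              simp [stepA, hlast]
            rw [hr'] at h
            rw [hr, hB, hA]
            exact h
      · -- new char: A appends c, B opens the run (c, 1)
        have hB : stepB (front ++ [(c0, n)]) c = (front ++ [(c0, n)]) ++ [(c, 1)] := by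
          simp [stepB, hc]
        have hinv' : ∀ p ∈ (front ++ [(c0, n)]) ++ [(c, 1)], (1 : Int) ≤ p.2 := by
          intro p hp
          rcases List.mem_append.1 hp with h | h
          · exact hinv p h
          · simp at h; subst h; omega
        have h := ih ((front ++ [(c0, n)]) ++ [(c, 1)]) hinv'
        have hA : stepA ((front.map rend).flatten ++ rend (c0, n), some c0) c
            = ((front.map rend).flatten ++ rend (c0, n) ++ [c], some c) := by
          simp [stepA, Ne.symm hc]
        rw [hB]
        rw [hA]
        simpa [rend, List.append_assoc] using h

theorem convert_spec : Claim_equal_convert := by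
  unfold Claim_equal_convert Spec_convert
  intro s _
  have h := loop_eq s.toList [] (by simp)
  simp only [List.map_nil, List.flatten_nil, List.getLast?_nil, Option.map_none] at h
  simp [convert, convert_alt, h]
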